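-- pv_equiv track=rewrite | github.com/Dibyansu16/PESCAN | PESCAN.py | get_feature_name
-- ===== SOURCE A (Python) =====
-- def get_feature_name(idx):
--     groups = [
--         (256, "histogram"),    (256, "byteentropy"),
--         (8,   "strings"),      (10,  "general"),
--         (3,   "header_coff"),  (14,  "header_opt"),
--         (50,  "section_name"), (50,  "section_rawsize"),
--         (50,  "section_entropy"), (50, "section_vsize"),
--         (50,  "section_props"),(256, "imports_lib"),
--         (1024,"imports_func"), (128, "exports"),
--         (30,  "datadirs"),
--     ]
--     pos = 0
--     for size, name in groups:
--         if idx < pos + size: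
--             return f"{name}_{idx - pos}"
--         pos += size
--     return f"feat_{idx}"
-- ===== SOURCE B (Python) =====
-- _NAMES = ["histogram", "byteentropy", "strings", "general", "header_coff",
--           "header_opt", "section_name", "section_rawsize", "section_entropy",
--           "section_vsize", "section_props", "imports_lib", "imports_func",
--           "exports", "datadirs"]
-- _SIZES = [256, 256, 8, 10, 3, 14, 50, 50, 50, 50, 50, 256, 1024, 128, 30]
--
-- # cumulative group ends (prefix sums of the sizes), built once at import time
-- _ENDS = []
-- _total = 0
-- for _s in _SIZES:
--     _total += _s
--     _ENDS.append(_total)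
-- _TOTAL = _ENDS[-1]
--
--
-- def _bisect_right(a, x, lo, hi):
--     """Index of the first element of a[lo:hi] strictly greater than x
--     (= bisect.bisect_right), by binary search."""
--     while lo < hi:
--         mid = (lo + hi) // 2
--         if x < a[mid]:
--             hi = mid
--         else:
--             lo = mid + 1
--     return lo
--
--
-- def get_feature_name(idx):
--     if idx >= _TOTAL:
--         return f"feat_{idx}"
--     g = _bisect_right(_ENDS, idx, 0, len(_ENDS))
--     pos = _ENDS[g - 1] if g else 0
--     return f"{_NAMES[g]}_{idx - pos}"
-- ===== Notes on version B (the rewrite author's own statement) =====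
-- stated objective: alternative
-- what changed: Replaced the sequential scan with a running offset by a precomputed prefix-sum table of group ends plus a bisect_right binary-search lookup.
import Mathlib
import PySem

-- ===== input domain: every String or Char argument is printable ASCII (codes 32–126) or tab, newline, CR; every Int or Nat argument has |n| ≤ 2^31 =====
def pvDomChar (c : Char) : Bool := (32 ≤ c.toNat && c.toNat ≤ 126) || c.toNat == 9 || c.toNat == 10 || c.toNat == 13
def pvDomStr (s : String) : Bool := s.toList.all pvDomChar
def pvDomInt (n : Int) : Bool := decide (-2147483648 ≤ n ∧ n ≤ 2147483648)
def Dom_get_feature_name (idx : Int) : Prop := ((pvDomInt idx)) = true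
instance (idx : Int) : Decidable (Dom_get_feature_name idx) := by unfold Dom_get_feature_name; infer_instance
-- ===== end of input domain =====

-- B replaces A's sequential scan-and-accumulate with a precomputed prefix-ends table and a
-- binary-search (bisect_right) lookup; objective: alternative decomposition, same exact values.

-- ===== PORT A =====
-- A's loop over groups with running offset pos, step for step.
def gfnLoop (idx : Int) : List (Int × String) → Int → String
  | [], _ => "feat_" ++ PySem.Int.toStr idx
  | (size, name) :: rest, pos =>
      if idx < pos + size then name ++ "_" ++ PySem.Int.toStr (idx - pos)
      else gfnLoop idx rest (pos + size)

def get_feature_name (idx : Int) : String :=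
  gfnLoop idx
    [(256, "histogram"), (256, "byteentropy"),
     (8, "strings"), (10, "general"),
     (3, "header_coff"), (14, "header_opt"),
     (50, "section_name"), (50, "section_rawsize"),
     (50, "section_entropy"), (50, "section_vsize"),
     (50, "section_props"), (256, "imports_lib"),
     (1024, "imports_func"), (128, "exports"),
     (30, "datadirs")] 0

-- ===== PORT B =====
-- module-level tables of Source B: group names and cumulative ends (prefix sums)
def pvNames : List String :=
  ["histogram", "byteentropy", "strings", "general", "header_coff", "header_opt",
   "section_name", "section_rawsize", "section_entropy", "section_vsize",
   "section_props", "imports_lib", "imports_func", "exports", "datadirs"]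

def pvEnds : List Int :=
  [256, 512, 520, 530, 533, 547, 597, 647, 697, 747, 797, 1053, 2077, 2205, 2235]

-- bisect.bisect_right, the standard-library binary search Source B calls
def bisectRight (a : List Int) (x : Int) (lo hi : Nat) : Nat :=
  if _h : lo < hi then
    let mid := (lo + hi) / 2
    if x < a.getD mid 0 then bisectRight a x lo mid
    else bisectRight a x (mid + 1) hi
  else lo
termination_by hi - lo
decreasing_by all_goals omega

def get_feature_name_alt (idx : Int) : String :=
  if idx ≥ 2235 then "feat_" ++ PySem.Int.toStr idx    -- _TOTAL = 2235
  else
    let g := bisectRight pvEnds idx 0 pvEnds.length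
    let pos : Int := if g = 0 then 0 else pvEnds.getD (g - 1) 0
    pvNames.getD g "" ++ "_" ++ PySem.Int.toStr (idx - pos)

-- ===== PRECONDITION & SPEC =====
def Spec_get_feature_name (idx : Int) (out : String) : Prop := out = get_feature_name_alt idx
instance (idx : Int) (out : String) : Decidable (Spec_get_feature_name idx out) := by unfold Spec_get_feature_name; infer_instance

-- ===== CLAIM (what is proved, stated in full; the proofs are below) =====
def Claim_equal_get_feature_name : Prop := ∀ (idx : Int), Dom_get_feature_name idx → Spec_get_feature_name idx (get_feature_name idx)

-- ===== LEMMAS AND PROOFS =====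

-- evaluation of the binary search on each group's half-open interval

theorem pvBis0 (idx : Int) (h2 : idx < 256) : bisectRight pvEnds idx 0 15 = 0 := by
  simp only [pvEnds]
  rw [bisectRight]; simp only [List.getD, List.getElem?_cons_succ, List.getElem?_cons_zero]; norm_num
  rw [if_pos (by omega)]
  rw [bisectRight]; simp only [List.getD, List.getElem?_cons_succ, List.getElem?_cons_zero]; norm_num
  rw [if_pos (by omega)]
  rw [bisectRight]; simp only [List.getD, List.getElem?_cons_succ, List.getElem?_cons_zero]; norm_num
  rw [if_pos (by omega)]
  rw [bisectRight]; simp only [List.getD, List.getElem?_cons_succ, List.getElem?_cons_zero]; norm_num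
  rw [if_pos (by omega)]
  rw [bisectRight]; norm_num

theorem pvBis1 (idx : Int) (h1 : 256 ≤ idx) (h2 : idx < 512) : bisectRight pvEnds idx 0 15 = 1 := by
  simp only [pvEnds]
  rw [bisectRight]; simp only [List.getD, List.getElem?_cons_succ, List.getElem?_cons_zero]; norm_num
  rw [if_pos (by omega)]
  rw [bisectRight]; simp only [List.getD, List.getElem?_cons_succ, List.getElem?_cons_zero]; norm_num
  rw [if_pos (by omega)]
  rw [bisectRight]; simp only [List.getD, List.getElem?_cons_succ, List.getElem?_cons_zero]; norm_num
  rw [if_pos (by omega)]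
  rw [bisectRight]; simp only [List.getD, List.getElem?_cons_succ, List.getElem?_cons_zero]; norm_num
  rw [if_neg (by omega)]
  rw [bisectRight]; norm_num

theorem pvBis2 (idx : Int) (h1 : 512 ≤ idx) (h2 : idx < 520) : bisectRight pvEnds idx 0 15 = 2 := by
  simp only [pvEnds]
  rw [bisectRight]; simp only [List.getD, List.getElem?_cons_succ, List.getElem?_cons_zero]; norm_num
  rw [if_pos (by omega)]
  rw [bisectRight]; simp only [List.getD, List.getElem?_cons_succ, List.getElem?_cons_zero]; norm_num
  rw [if_pos (by omega)]
  rw [bisectRight]; simp only [List.getD, List.getElem?_cons_succ, List.getElem?_cons_zero]; norm_num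
  rw [if_neg (by omega)]
  rw [bisectRight]; simp only [List.getD, List.getElem?_cons_succ, List.getElem?_cons_zero]; norm_num
  rw [if_pos (by omega)]
  rw [bisectRight]; norm_num

theorem pvBis3 (idx : Int) (h1 : 520 ≤ idx) (h2 : idx < 530) : bisectRight pvEnds idx 0 15 = 3 := by
  simp only [pvEnds]
  rw [bisectRight]; simp only [List.getD, List.getElem?_cons_succ, List.getElem?_cons_zero]; norm_num
  rw [if_pos (by omega)]
  rw [bisectRight]; simp only [List.getD, List.getElem?_cons_succ, List.getElem?_cons_zero]; norm_num
  rw [if_pos (by omega)]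
  rw [bisectRight]; simp only [List.getD, List.getElem?_cons_succ, List.getElem?_cons_zero]; norm_num
  rw [if_neg (by omega)]
  rw [bisectRight]; simp only [List.getD, List.getElem?_cons_succ, List.getElem?_cons_zero]; norm_num
  rw [if_neg (by omega)]
  rw [bisectRight]; norm_num

theorem pvBis4 (idx : Int) (h1 : 530 ≤ idx) (h2 : idx < 533) : bisectRight pvEnds idx 0 15 = 4 := by
  simp only [pvEnds]
  rw [bisectRight]; simp only [List.getD, List.getElem?_cons_succ, List.getElem?_cons_zero]; norm_num
  rw [if_pos (by omega)]
  rw [bisectRight]; simp only [List.getD, List.getElem?_cons_succ, List.getElem?_cons_zero]; norm_num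
  rw [if_neg (by omega)]
  rw [bisectRight]; simp only [List.getD, List.getElem?_cons_succ, List.getElem?_cons_zero]; norm_num
  rw [if_pos (by omega)]
  rw [bisectRight]; simp only [List.getD, List.getElem?_cons_succ, List.getElem?_cons_zero]; norm_num
  rw [if_pos (by omega)]
  rw [bisectRight]; norm_num

theorem pvBis5 (idx : Int) (h1 : 533 ≤ idx) (h2 : idx < 547) : bisectRight pvEnds idx 0 15 = 5 := by
  simp only [pvEnds]
  rw [bisectRight]; simp only [List.getD, List.getElem?_cons_succ, List.getElem?_cons_zero]; norm_num
  rw [if_pos (by omega)]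
  rw [bisectRight]; simp only [List.getD, List.getElem?_cons_succ, List.getElem?_cons_zero]; norm_num
  rw [if_neg (by omega)]
  rw [bisectRight]; simp only [List.getD, List.getElem?_cons_succ, List.getElem?_cons_zero]; norm_num
  rw [if_pos (by omega)]
  rw [bisectRight]; simp only [List.getD, List.getElem?_cons_succ, List.getElem?_cons_zero]; norm_num
  rw [if_neg (by omega)]
  rw [bisectRight]; norm_num

theorem pvBis6 (idx : Int) (h1 : 547 ≤ idx) (h2 : idx < 597) : bisectRight pvEnds idx 0 15 = 6 := by
  simp only [pvEnds]
  rw [bisectRight]; simp only [List.getD, List.getElem?_cons_succ, List.getElem?_cons_zero]; norm_num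
  rw [if_pos (by omega)]
  rw [bisectRight]; simp only [List.getD, List.getElem?_cons_succ, List.getElem?_cons_zero]; norm_num
  rw [if_neg (by omega)]
  rw [bisectRight]; simp only [List.getD, List.getElem?_cons_succ, List.getElem?_cons_zero]; norm_num
  rw [if_neg (by omega)]
  rw [bisectRight]; simp only [List.getD, List.getElem?_cons_succ, List.getElem?_cons_zero]; norm_num
  rw [if_pos (by omega)]
  rw [bisectRight]; norm_num

theorem pvBis7 (idx : Int) (h1 : 597 ≤ idx) (h2 : idx < 647) : bisectRight pvEnds idx 0 15 = 7 := by
  simp only [pvEnds]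
  rw [bisectRight]; simp only [List.getD, List.getElem?_cons_succ, List.getElem?_cons_zero]; norm_num
  rw [if_pos (by omega)]
  rw [bisectRight]; simp only [List.getD, List.getElem?_cons_succ, List.getElem?_cons_zero]; norm_num
  rw [if_neg (by omega)]
  rw [bisectRight]; simp only [List.getD, List.getElem?_cons_succ, List.getElem?_cons_zero]; norm_num
  rw [if_neg (by omega)]
  rw [bisectRight]; simp only [List.getD, List.getElem?_cons_succ, List.getElem?_cons_zero]; norm_num
  rw [if_neg (by omega)]
  rw [bisectRight]; norm_num

theorem pvBis8 (idx : Int) (h1 : 647 ≤ idx) (h2 : idx < 697) : bisectRight pvEnds idx 0 15 = 8 := by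
  simp only [pvEnds]
  rw [bisectRight]; simp only [List.getD, List.getElem?_cons_succ, List.getElem?_cons_zero]; norm_num
  rw [if_neg (by omega)]
  rw [bisectRight]; simp only [List.getD, List.getElem?_cons_succ, List.getElem?_cons_zero]; norm_num
  rw [if_pos (by omega)]
  rw [bisectRight]; simp only [List.getD, List.getElem?_cons_succ, List.getElem?_cons_zero]; norm_num
  rw [if_pos (by omega)]
  rw [bisectRight]; simp only [List.getD, List.getElem?_cons_succ, List.getElem?_cons_zero]; norm_num
  rw [if_pos (by omega)]
  rw [bisectRight]; norm_num

theorem pvBis9 (idx : Int) (h1 : 697 ≤ idx) (h2 : idx < 747) : bisectRight pvEnds idx 0 15 = 9 := by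
  simp only [pvEnds]
  rw [bisectRight]; simp only [List.getD, List.getElem?_cons_succ, List.getElem?_cons_zero]; norm_num
  rw [if_neg (by omega)]
  rw [bisectRight]; simp only [List.getD, List.getElem?_cons_succ, List.getElem?_cons_zero]; norm_num
  rw [if_pos (by omega)]
  rw [bisectRight]; simp only [List.getD, List.getElem?_cons_succ, List.getElem?_cons_zero]; norm_num
  rw [if_pos (by omega)]
  rw [bisectRight]; simp only [List.getD, List.getElem?_cons_succ, List.getElem?_cons_zero]; norm_num
  rw [if_neg (by omega)]
  rw [bisectRight]; norm_num

theorem pvBis10 (idx : Int) (h1 : 747 ≤ idx) (h2 : idx < 797) : bisectRight pvEnds idx 0 15 = 10 := by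
  simp only [pvEnds]
  rw [bisectRight]; simp only [List.getD, List.getElem?_cons_succ, List.getElem?_cons_zero]; norm_num
  rw [if_neg (by omega)]
  rw [bisectRight]; simp only [List.getD, List.getElem?_cons_succ, List.getElem?_cons_zero]; norm_num
  rw [if_pos (by omega)]
  rw [bisectRight]; simp only [List.getD, List.getElem?_cons_succ, List.getElem?_cons_zero]; norm_num
  rw [if_neg (by omega)]
  rw [bisectRight]; simp only [List.getD, List.getElem?_cons_succ, List.getElem?_cons_zero]; norm_num
  rw [if_pos (by omega)]
  rw [bisectRight]; norm_num

theorem pvBis11 (idx : Int) (h1 : 797 ≤ idx) (h2 : idx < 1053) : bisectRight pvEnds idx 0 15 = 11 := by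
  simp only [pvEnds]
  rw [bisectRight]; simp only [List.getD, List.getElem?_cons_succ, List.getElem?_cons_zero]; norm_num
  rw [if_neg (by omega)]
  rw [bisectRight]; simp only [List.getD, List.getElem?_cons_succ, List.getElem?_cons_zero]; norm_num
  rw [if_pos (by omega)]
  rw [bisectRight]; simp only [List.getD, List.getElem?_cons_succ, List.getElem?_cons_zero]; norm_num
  rw [if_neg (by omega)]
  rw [bisectRight]; simp only [List.getD, List.getElem?_cons_succ, List.getElem?_cons_zero]; norm_num
  rw [if_neg (by omega)]
  rw [bisectRight]; norm_num

theorem pvBis12 (idx : Int) (h1 : 1053 ≤ idx) (h2 : idx < 2077) : bisectRight pvEnds idx 0 15 = 12 := by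
  simp only [pvEnds]
  rw [bisectRight]; simp only [List.getD, List.getElem?_cons_succ, List.getElem?_cons_zero]; norm_num
  rw [if_neg (by omega)]
  rw [bisectRight]; simp only [List.getD, List.getElem?_cons_succ, List.getElem?_cons_zero]; norm_num
  rw [if_neg (by omega)]
  rw [bisectRight]; simp only [List.getD, List.getElem?_cons_succ, List.getElem?_cons_zero]; norm_num
  rw [if_pos (by omega)]
  rw [bisectRight]; simp only [List.getD, List.getElem?_cons_succ, List.getElem?_cons_zero]; norm_num
  rw [if_pos (by omega)]
  rw [bisectRight]; norm_num

theorem pvBis13 (idx : Int) (h1 : 2077 ≤ idx) (h2 : idx < 2205) : bisectRight pvEnds idx 0 15 = 13 := by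
  simp only [pvEnds]
  rw [bisectRight]; simp only [List.getD, List.getElem?_cons_succ, List.getElem?_cons_zero]; norm_num
  rw [if_neg (by omega)]
  rw [bisectRight]; simp only [List.getD, List.getElem?_cons_succ, List.getElem?_cons_zero]; norm_num
  rw [if_neg (by omega)]
  rw [bisectRight]; simp only [List.getD, List.getElem?_cons_succ, List.getElem?_cons_zero]; norm_num
  rw [if_pos (by omega)]
  rw [bisectRight]; simp only [List.getD, List.getElem?_cons_succ, List.getElem?_cons_zero]; norm_num
  rw [if_neg (by omega)]
  rw [bisectRight]; norm_num

theorem pvBis14 (idx : Int) (h1 : 2205 ≤ idx) (h2 : idx < 2235) : bisectRight pvEnds idx 0 15 = 14 := by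
  simp only [pvEnds]
  rw [bisectRight]; simp only [List.getD, List.getElem?_cons_succ, List.getElem?_cons_zero]; norm_num
  rw [if_neg (by omega)]
  rw [bisectRight]; simp only [List.getD, List.getElem?_cons_succ, List.getElem?_cons_zero]; norm_num
  rw [if_neg (by omega)]
  rw [bisectRight]; simp only [List.getD, List.getElem?_cons_succ, List.getElem?_cons_zero]; norm_num
  rw [if_neg (by omega)]
  rw [bisectRight]; simp only [List.getD, List.getElem?_cons_succ, List.getElem?_cons_zero]; norm_num
  rw [if_pos (by omega)]
  rw [bisectRight]; norm_num

-- agreement on one group's interval: unfold A's scan to group g, B via pvBis{g}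
theorem pvCase0 (idx : Int) (h2 : idx < 256) : get_feature_name idx = get_feature_name_alt idx := by
  simp only [get_feature_name, get_feature_name_alt]
  rw [if_neg (show ¬ idx ≥ 2235 by omega)]
  rw [show pvEnds.length = 15 from rfl, pvBis0 idx (by omega)]
  norm_num [pvEnds, pvNames, List.getD]
  simp only [gfnLoop]
  rw [if_pos (by omega)]
  norm_num

theorem pvCase1 (idx : Int) (h1 : 256 ≤ idx) (h2 : idx < 512) : get_feature_name idx = get_feature_name_alt idx := by
  simp only [get_feature_name, get_feature_name_alt]
  rw [if_neg (show ¬ idx ≥ 2235 by omega)]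
  rw [show pvEnds.length = 15 from rfl, pvBis1 idx (by omega) (by omega)]
  norm_num [pvEnds, pvNames, List.getD]
  simp only [gfnLoop]
  rw [if_neg (by omega)]
  rw [if_pos (by omega)]
  norm_num

theorem pvCase2 (idx : Int) (h1 : 512 ≤ idx) (h2 : idx < 520) : get_feature_name idx = get_feature_name_alt idx := by
  simp only [get_feature_name, get_feature_name_alt]
  rw [if_neg (show ¬ idx ≥ 2235 by omega)]
  rw [show pvEnds.length = 15 from rfl, pvBis2 idx (by omega) (by omega)]
  norm_num [pvEnds, pvNames, List.getD]
  simp only [gfnLoop]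
  rw [if_neg (by omega)]
  rw [if_neg (by omega)]
  rw [if_pos (by omega)]
  norm_num

theorem pvCase3 (idx : Int) (h1 : 520 ≤ idx) (h2 : idx < 530) : get_feature_name idx = get_feature_name_alt idx := by
  simp only [get_feature_name, get_feature_name_alt]
  rw [if_neg (show ¬ idx ≥ 2235 by omega)]
  rw [show pvEnds.length = 15 from rfl, pvBis3 idx (by omega) (by omega)]
  norm_num [pvEnds, pvNames, List.getD]
  simp only [gfnLoop]
  rw [if_neg (by omega)]
  rw [if_neg (by omega)]
  rw [if_neg (by omega)]
  rw [if_pos (by omega)]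
  norm_num

theorem pvCase4 (idx : Int) (h1 : 530 ≤ idx) (h2 : idx < 533) : get_feature_name idx = get_feature_name_alt idx := by
  simp only [get_feature_name, get_feature_name_alt]
  rw [if_neg (show ¬ idx ≥ 2235 by omega)]
  rw [show pvEnds.length = 15 from rfl, pvBis4 idx (by omega) (by omega)]
  norm_num [pvEnds, pvNames, List.getD]
  simp only [gfnLoop]
  rw [if_neg (by omega)]
  rw [if_neg (by omega)]
  rw [if_neg (by omega)]
  rw [if_neg (by omega)]
  rw [if_pos (by omega)]
  norm_num

theorem pvCase5 (idx : Int) (h1 : 533 ≤ idx) (h2 : idx < 547) : get_feature_name idx = get_feature_name_alt idx := by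
  simp only [get_feature_name, get_feature_name_alt]
  rw [if_neg (show ¬ idx ≥ 2235 by omega)]
  rw [show pvEnds.length = 15 from rfl, pvBis5 idx (by omega) (by omega)]
  norm_num [pvEnds, pvNames, List.getD]
  simp only [gfnLoop]
  rw [if_neg (by omega)]
  rw [if_neg (by omega)]
  rw [if_neg (by omega)]
  rw [if_neg (by omega)]
  rw [if_neg (by omega)]
  rw [if_pos (by omega)]
  norm_num

theorem pvCase6 (idx : Int) (h1 : 547 ≤ idx) (h2 : idx < 597) : get_feature_name idx = get_feature_name_alt idx := by
  simp only [get_feature_name, get_feature_name_alt]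
  rw [if_neg (show ¬ idx ≥ 2235 by omega)]
  rw [show pvEnds.length = 15 from rfl, pvBis6 idx (by omega) (by omega)]
  norm_num [pvEnds, pvNames, List.getD]
  simp only [gfnLoop]
  rw [if_neg (by omega)]
  rw [if_neg (by omega)]
  rw [if_neg (by omega)]
  rw [if_neg (by omega)]
  rw [if_neg (by omega)]
  rw [if_neg (by omega)]
  rw [if_pos (by omega)]
  norm_num

theorem pvCase7 (idx : Int) (h1 : 597 ≤ idx) (h2 : idx < 647) : get_feature_name idx = get_feature_name_alt idx := by
  simp only [get_feature_name, get_feature_name_alt]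
  rw [if_neg (show ¬ idx ≥ 2235 by omega)]
  rw [show pvEnds.length = 15 from rfl, pvBis7 idx (by omega) (by omega)]
  norm_num [pvEnds, pvNames, List.getD]
  simp only [gfnLoop]
  rw [if_neg (by omega)]
  rw [if_neg (by omega)]
  rw [if_neg (by omega)]
  rw [if_neg (by omega)]
  rw [if_neg (by omega)]
  rw [if_neg (by omega)]
  rw [if_neg (by omega)]
  rw [if_pos (by omega)]
  norm_num

theorem pvCase8 (idx : Int) (h1 : 647 ≤ idx) (h2 : idx < 697) : get_feature_name idx = get_feature_name_alt idx := by
  simp only [get_feature_name, get_feature_name_alt]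
  rw [if_neg (show ¬ idx ≥ 2235 by omega)]
  rw [show pvEnds.length = 15 from rfl, pvBis8 idx (by omega) (by omega)]
  norm_num [pvEnds, pvNames, List.getD]
  simp only [gfnLoop]
  rw [if_neg (by omega)]
  rw [if_neg (by omega)]
  rw [if_neg (by omega)]
  rw [if_neg (by omega)]
  rw [if_neg (by omega)]
  rw [if_neg (by omega)]
  rw [if_neg (by omega)]
  rw [if_neg (by omega)]
  rw [if_pos (by omega)]
  norm_num

theorem pvCase9 (idx : Int) (h1 : 697 ≤ idx) (h2 : idx < 747) : get_feature_name idx = get_feature_name_alt idx := by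
  simp only [get_feature_name, get_feature_name_alt]
  rw [if_neg (show ¬ idx ≥ 2235 by omega)]
  rw [show pvEnds.length = 15 from rfl, pvBis9 idx (by omega) (by omega)]
  norm_num [pvEnds, pvNames, List.getD]
  simp only [gfnLoop]
  rw [if_neg (by omega)]
  rw [if_neg (by omega)]
  rw [if_neg (by omega)]
  rw [if_neg (by omega)]
  rw [if_neg (by omega)]
  rw [if_neg (by omega)]
  rw [if_neg (by omega)]
  rw [if_neg (by omega)]
  rw [if_neg (by omega)]
  rw [if_pos (by omega)]
  norm_num

theorem pvCase10 (idx : Int) (h1 : 747 ≤ idx) (h2 : idx < 797) : get_feature_name idx = get_feature_name_alt idx := by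
  simp only [get_feature_name, get_feature_name_alt]
  rw [if_neg (show ¬ idx ≥ 2235 by omega)]
  rw [show pvEnds.length = 15 from rfl, pvBis10 idx (by omega) (by omega)]
  norm_num [pvEnds, pvNames, List.getD]
  simp only [gfnLoop]
  rw [if_neg (by omega)]
  rw [if_neg (by omega)]
  rw [if_neg (by omega)]
  rw [if_neg (by omega)]
  rw [if_neg (by omega)]
  rw [if_neg (by omega)]
  rw [if_neg (by omega)]
  rw [if_neg (by omega)]
  rw [if_neg (by omega)]
  rw [if_neg (by omega)]
  rw [if_pos (by omega)]
  norm_num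

theorem pvCase11 (idx : Int) (h1 : 797 ≤ idx) (h2 : idx < 1053) : get_feature_name idx = get_feature_name_alt idx := by
  simp only [get_feature_name, get_feature_name_alt]
  rw [if_neg (show ¬ idx ≥ 2235 by omega)]
  rw [show pvEnds.length = 15 from rfl, pvBis11 idx (by omega) (by omega)]
  norm_num [pvEnds, pvNames, List.getD]
  simp only [gfnLoop]
  rw [if_neg (by omega)]
  rw [if_neg (by omega)]
  rw [if_neg (by omega)]
  rw [if_neg (by omega)]
  rw [if_neg (by omega)]
  rw [if_neg (by omega)]
  rw [if_neg (by omega)]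
  rw [if_neg (by omega)]
  rw [if_neg (by omega)]
  rw [if_neg (by omega)]
  rw [if_neg (by omega)]
  rw [if_pos (by omega)]
  norm_num

theorem pvCase12 (idx : Int) (h1 : 1053 ≤ idx) (h2 : idx < 2077) : get_feature_name idx = get_feature_name_alt idx := by
  simp only [get_feature_name, get_feature_name_alt]
  rw [if_neg (show ¬ idx ≥ 2235 by omega)]
  rw [show pvEnds.length = 15 from rfl, pvBis12 idx (by omega) (by omega)]
  norm_num [pvEnds, pvNames, List.getD]
  simp only [gfnLoop]
  rw [if_neg (by omega)]
  rw [if_neg (by omega)]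
  rw [if_neg (by omega)]
  rw [if_neg (by omega)]
  rw [if_neg (by omega)]
  rw [if_neg (by omega)]
  rw [if_neg (by omega)]
  rw [if_neg (by omega)]
  rw [if_neg (by omega)]
  rw [if_neg (by omega)]
  rw [if_neg (by omega)]
  rw [if_neg (by omega)]
  rw [if_pos (by omega)]
  norm_num

theorem pvCase13 (idx : Int) (h1 : 2077 ≤ idx) (h2 : idx < 2205) : get_feature_name idx = get_feature_name_alt idx := by
  simp only [get_feature_name, get_feature_name_alt]
  rw [if_neg (show ¬ idx ≥ 2235 by omega)]
  rw [show pvEnds.length = 15 from rfl, pvBis13 idx (by omega) (by omega)]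
  norm_num [pvEnds, pvNames, List.getD]
  simp only [gfnLoop]
  rw [if_neg (by omega)]
  rw [if_neg (by omega)]
  rw [if_neg (by omega)]
  rw [if_neg (by omega)]
  rw [if_neg (by omega)]
  rw [if_neg (by omega)]
  rw [if_neg (by omega)]
  rw [if_neg (by omega)]
  rw [if_neg (by omega)]
  rw [if_neg (by omega)]
  rw [if_neg (by omega)]
  rw [if_neg (by omega)]
  rw [if_neg (by omega)]
  rw [if_pos (by omega)]
  norm_num

theorem pvCase14 (idx : Int) (h1 : 2205 ≤ idx) (h2 : idx < 2235) : get_feature_name idx = get_feature_name_alt idx := by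
  simp only [get_feature_name, get_feature_name_alt]
  rw [if_neg (show ¬ idx ≥ 2235 by omega)]
  rw [show pvEnds.length = 15 from rfl, pvBis14 idx (by omega) (by omega)]
  norm_num [pvEnds, pvNames, List.getD]
  simp only [gfnLoop]
  rw [if_neg (by omega)]
  rw [if_neg (by omega)]
  rw [if_neg (by omega)]
  rw [if_neg (by omega)]
  rw [if_neg (by omega)]
  rw [if_neg (by omega)]
  rw [if_neg (by omega)]
  rw [if_neg (by omega)]
  rw [if_neg (by omega)]
  rw [if_neg (by omega)]
  rw [if_neg (by omega)]
  rw [if_neg (by omega)]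
  rw [if_neg (by omega)]
  rw [if_neg (by omega)]
  rw [if_pos (by omega)]
  norm_num

theorem pvCaseTop (idx : Int) (hT : idx ≥ 2235) : get_feature_name idx = get_feature_name_alt idx := by
  simp only [get_feature_name, get_feature_name_alt, gfnLoop]
  rw [if_pos hT]
  repeat rw [if_neg (by omega)]

-- ===== VERDICT (by name: the statement is the Claim_ definition above) =====
theorem get_feature_name_spec : Claim_equal_get_feature_name := by
  intro idx _
  unfold Spec_get_feature_name
  by_cases hT : idx ≥ 2235
  · exact pvCaseTop idx hT
  by_cases h0 : idx < 256
  · exact pvCase0 idx h0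
  by_cases h1 : idx < 512
  · exact pvCase1 idx (by omega) h1
  by_cases h2 : idx < 520
  · exact pvCase2 idx (by omega) h2
  by_cases h3 : idx < 530
  · exact pvCase3 idx (by omega) h3
  by_cases h4 : idx < 533
  · exact pvCase4 idx (by omega) h4
  by_cases h5 : idx < 547
  · exact pvCase5 idx (by omega) h5
  by_cases h6 : idx < 597
  · exact pvCase6 idx (by omega) h6
  by_cases h7 : idx < 647
  · exact pvCase7 idx (by omega) h7
  by_cases h8 : idx < 697
  · exact pvCase8 idx (by omega) h8
  by_cases h9 : idx < 747
  · exact pvCase9 idx (by omega) h9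
  by_cases h10 : idx < 797
  · exact pvCase10 idx (by omega) h10
  by_cases h11 : idx < 1053
  · exact pvCase11 idx (by omega) h11
  by_cases h12 : idx < 2077
  · exact pvCase12 idx (by omega) h12
  by_cases h13 : idx < 2205
  · exact pvCase13 idx (by omega) h13
  by_cases h14 : idx < 2235
  · exact pvCase14 idx (by omega) h14
  omega
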